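-- pv_equiv track=rewrite | github.com/flowing1ife/algorithm_study | baekjoon/silver/19636.py | diet
-- ===== SOURCE A (Python) =====
-- import math
--
-- def diet(day, w0, i0, t, i, a) :
--     m1 = i0
--     w1 = w0
--
--     for j in range(1, day+1):
--
--         # 변화 S 계산
--         s1 = m1 + a
--
--         # w += i - s 계산
--         # 1. 변화 X -> i - (i0 + a)
--         w0 += i - (i0 + a)
--         # 2. 변화 O -> i - s1
--         w1 += i - s1
--
--         if abs(i - s1) > t :
--             m1 += math.floor((i-s1)/2)
--
--
--     return w0, w1, m1
-- ===== SOURCE B (Python) =====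
-- def diet(day, w0, i0, t, i, a):
--     # B: closed form for the no-change weight; the metabolism recurrence halves
--     # its gap each step, so iterate it only until it stops changing (O(log gap))
--     # and finish the changed weight with one multiplication.
--     n = day if day > 0 else 0
--     wa = w0 + n * (i - i0 - a)
--     w1, m1 = w0, i0
--     j = 0
--     while j < n:
--         d = i - (m1 + a)
--         step = d // 2 if abs(d) > t else 0
--         if step == 0:
--             break
--         w1 += d
--         m1 += step
--         j += 1
--     w1 += (n - j) * (i - (m1 + a))
--     return wa, w1, m1
-- ===== Notes on version B (the rewrite author's own statement) =====
-- stated objective: faster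
-- what changed: B replaces the O(day) day-by-day simulation with a closed form for the unchanged weight and iterates the metabolism recurrence only until it reaches its fixed point (the gap halves each step), finishing the changed weight with one multiplication.
import Mathlib
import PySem

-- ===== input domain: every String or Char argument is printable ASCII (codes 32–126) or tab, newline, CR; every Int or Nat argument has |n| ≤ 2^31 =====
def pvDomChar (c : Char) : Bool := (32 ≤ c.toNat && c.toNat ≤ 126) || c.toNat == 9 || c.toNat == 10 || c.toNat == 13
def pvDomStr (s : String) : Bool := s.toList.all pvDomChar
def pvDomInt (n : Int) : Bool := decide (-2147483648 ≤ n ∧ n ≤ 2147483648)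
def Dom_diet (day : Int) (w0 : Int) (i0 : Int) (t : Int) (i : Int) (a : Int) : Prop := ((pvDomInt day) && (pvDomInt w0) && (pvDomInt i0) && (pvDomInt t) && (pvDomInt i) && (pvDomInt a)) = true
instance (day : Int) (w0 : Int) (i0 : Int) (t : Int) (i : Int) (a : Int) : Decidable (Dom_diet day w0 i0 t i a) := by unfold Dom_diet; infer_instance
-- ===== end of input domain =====

-- ===== PORT A =====
-- literal transliteration of A: fold the daily update over range(1, day+1).
-- math.floor((i-s1)/2) is exact integer floor division here (the operands stay
-- far below 2^53 on Dom), ported as PySem.Int.floordiv.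
def diet (day : Int) (w0 : Int) (i0 : Int) (t : Int) (i : Int) (a : Int) : Int × Int × Int :=
  (PySem.List.pyRange 1 (day + 1) 1).foldl
    (fun (st : Int × Int × Int) _ =>
      let s1 := st.2.2 + a
      let w0' := st.1 + (i - (i0 + a))
      let w1' := st.2.1 + (i - s1)
      let m1' := if |i - s1| > t then st.2.2 + PySem.Int.floordiv (i - s1) 2 else st.2.2
      (w0', w1', m1'))
    (w0, w0, i0)

-- ===== PORT B =====
-- B's while loop: run at most n days, stop as soon as m1 would stop changing;
-- returns (w1, m1, remaining days).
def dietLoop (t i a : Int) : Nat → Int → Int → Int × Int × Nat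
  | 0, w1, m1 => (w1, m1, 0)
  | n + 1, w1, m1 =>
    let d := i - (m1 + a)
    let step := if |d| > t then PySem.Int.floordiv d 2 else 0
    if step = 0 then (w1, m1, n + 1)
    else dietLoop t i a n (w1 + d) (m1 + step)

def diet_alt (day : Int) (w0 : Int) (i0 : Int) (t : Int) (i : Int) (a : Int) : Int × Int × Int :=
  let n : Nat := day.toNat
  let wa := w0 + (n : Int) * (i - i0 - a)
  let r := dietLoop t i a n w0 i0
  (wa, r.1 + ((r.2.2 : Int)) * (i - (r.2.1 + a)), r.2.1)

-- ===== PRECONDITION & SPEC =====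
def Spec_diet (day : Int) (w0 : Int) (i0 : Int) (t : Int) (i : Int) (a : Int) (out : Int × Int × Int) : Prop := out = diet_alt day w0 i0 t i a
instance (day : Int) (w0 : Int) (i0 : Int) (t : Int) (i : Int) (a : Int) (out : Int × Int × Int) : Decidable (Spec_diet day w0 i0 t i a out) := by unfold Spec_diet; infer_instance

-- ===== CLAIM (what is proved, stated in full; the proofs are below) =====
def Claim_equal_diet : Prop := ∀ (day : Int) (w0 : Int) (i0 : Int) (t : Int) (i : Int) (a : Int), Dom_diet day w0 i0 t i a → Spec_diet day w0 i0 t i a (diet day w0 i0 t i a)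

-- ===== LEMMAS AND PROOFS =====

-- A's one-day update on the (w1, m1) pair
def stepW (t i a : Int) (p : Int × Int) : Int × Int :=
  (p.1 + (i - (p.2 + a)),
   if |i - (p.2 + a)| > t then p.2 + PySem.Int.floordiv (i - (p.2 + a)) 2 else p.2)

-- a fold whose body ignores the list element is an iterate
theorem foldl_const {α β : Type} (f : α → α) (l : List β) (s : α) :
    l.foldl (fun x _ => f x) s = f^[l.length] s := by
  induction l generalizing s with
  | nil => rfl
  | cons b bs ih => simp [List.foldl, ih, Function.iterate_succ_apply]

-- the triple iterate splits: w0 advances by a constant, (w1,m1) by stepW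
theorem iterate_triple (t i i0 a : Int) (n : Nat) (w0 w1 m1 : Int) :
    (fun (st : Int × Int × Int) =>
        let s1 := st.2.2 + a
        (st.1 + (i - (i0 + a)), st.2.1 + (i - s1),
         if |i - s1| > t then st.2.2 + PySem.Int.floordiv (i - s1) 2 else st.2.2))^[n]
      (w0, w1, m1)
      = (w0 + (n : Int) * (i - i0 - a), (stepW t i a)^[n] (w1, m1)) := by
  induction n generalizing w0 w1 m1 with
  | zero => simp
  | succ k ih =>
    rw [Function.iterate_succ_apply, Function.iterate_succ_apply]
    rw [ih]
    simp only [stepW, Prod.mk.injEq]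
    refine ⟨by push_cast; ring, trivial⟩

-- once the step is zero, m1 is fixed and each day only adds d to w1
theorem iterate_fixed (t i a : Int) (n : Nat) (w1 m1 : Int)
    (h : (if |i - (m1 + a)| > t then PySem.Int.floordiv (i - (m1 + a)) 2 else 0) = 0) :
    (stepW t i a)^[n] (w1, m1) = (w1 + (n : Int) * (i - (m1 + a)), m1) := by
  induction n generalizing w1 with
  | zero => simp
  | succ k ih =>
    rw [Function.iterate_succ_apply]
    have hs : stepW t i a (w1, m1) = (w1 + (i - (m1 + a)), m1) := by
      simp only [stepW]
      split_ifs at h ⊢ with hc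
      · rw [h]; simp
      · rfl
    rw [hs, ih]
    simp only [Prod.mk.injEq]
    refine ⟨by push_cast; ring, trivial⟩

-- dietLoop computes the same result as n applications of stepW
theorem dietLoop_iterate (t i a : Int) (n : Nat) (w1 m1 : Int) :
    (stepW t i a)^[n] (w1, m1)
      = ((dietLoop t i a n w1 m1).1
           + ((dietLoop t i a n w1 m1).2.2 : Int)
             * (i - ((dietLoop t i a n w1 m1).2.1 + a)),
         (dietLoop t i a n w1 m1).2.1) := by
  induction n generalizing w1 m1 with
  | zero => simp [dietLoop]
  | succ k ih =>
    by_cases hz : (if |i - (m1 + a)| > t then PySem.Int.floordiv (i - (m1 + a)) 2 else 0) = 0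
    · rw [iterate_fixed t i a (k + 1) w1 m1 hz]
      simp only [dietLoop, hz, if_pos]
    · have hloop : dietLoop t i a (k + 1) w1 m1
          = dietLoop t i a k (w1 + (i - (m1 + a)))
              (m1 + (if |i - (m1 + a)| > t then PySem.Int.floordiv (i - (m1 + a)) 2 else 0)) := by
        simp only [dietLoop]
        rw [if_neg hz]
      have hstep : stepW t i a (w1, m1)
          = (w1 + (i - (m1 + a)),
             m1 + (if |i - (m1 + a)| > t then PySem.Int.floordiv (i - (m1 + a)) 2 else 0)) := by
        simp only [stepW]
        split_ifs with hc
        · rfl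
        · simp
      rw [Function.iterate_succ_apply, hstep, ih, hloop]

-- ===== VERDICT (by name: the statement is the Claim_ definition above) =====
theorem diet_spec : Claim_equal_diet := by
  intro day w0 i0 t i a _
  show _ = _
  unfold diet diet_alt
  rw [foldl_const, PySem.List.length_pyRange_one]
  have hn : (day + 1 - 1).toNat = day.toNat := by omega
  rw [hn, iterate_triple, dietLoop_iterate]
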